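-- pv_equiv track=rewrite | github.com/andrewyzhou/nexus | ai/supplier_extraction.py | parse_sections_from_txt
-- ===== SOURCE A (Python) =====
-- def parse_sections_from_txt(content: str) -> dict:
--     """Parse the section txt files back into a dict."""
--     sections = {}
--     current_section = None
--     current_lines = []
--
--     for line in content.splitlines():
--         if line.startswith("--- ") and line.endswith(" ---"):
--             if current_section:
--                 sections[current_section] = "\n".join(current_lines).strip()
--             current_section = line.strip("- ").lower()
--             current_lines = []
--         else:
--             current_lines.append(line)
--
--     if current_section:
--         sections[current_section] = "\n".join(current_lines).strip()
--
--     return sections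
-- ===== SOURCE B (Python) =====
-- def parse_sections_from_txt(content: str) -> dict:
--     """Parse the section txt files back into a dict."""
--     def is_header(line):
--         return line.startswith("--- ") and line.endswith(" ---")
--
--     def next_body(ls):
--         # split ls at the first header line: (lines before it, remainder from it)
--         for k, l in enumerate(ls):
--             if is_header(l):
--                 return ls[:k], ls[k:]
--         return ls, []
--
--     _, rest = next_body(content.splitlines())   # drop the preamble
--     sections = {}
--     while rest:
--         name = rest[0].strip("- ").lower()
--         body, rest = next_body(rest[1:])
--         if name:
--             sections[name] = "\n".join(body).strip()
--     return sections
-- ===== Notes on version B (the rewrite author's own statement) =====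
-- stated objective: alternative
-- what changed: B replaces A's single streaming fold with a current-section name and line-buffer accumulator by a segment decomposition: a next_body helper splits the line list at the first header, the preamble is cut off once, and a loop repeatedly takes (header, body-until-next-header) blocks and assigns them.
import Mathlib
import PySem

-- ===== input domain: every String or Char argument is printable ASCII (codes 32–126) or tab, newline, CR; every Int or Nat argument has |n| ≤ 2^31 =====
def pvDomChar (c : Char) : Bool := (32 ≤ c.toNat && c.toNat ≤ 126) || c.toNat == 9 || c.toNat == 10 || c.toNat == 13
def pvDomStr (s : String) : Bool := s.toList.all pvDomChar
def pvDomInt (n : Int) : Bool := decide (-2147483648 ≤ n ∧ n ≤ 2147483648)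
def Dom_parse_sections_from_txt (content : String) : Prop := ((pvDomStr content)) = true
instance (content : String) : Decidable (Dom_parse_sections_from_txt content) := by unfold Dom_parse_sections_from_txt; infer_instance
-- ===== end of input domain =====

-- B replaces A's streaming fold (current-section + line-buffer accumulator) by a segment split:
-- repeatedly cut off the next (header, body-until-next-header) block; same result, alternative decomposition.

-- ===== PORT A =====
-- 'if current_section: sections[current_section] = "\n".join(current_lines).strip()' (used twice in A)
def pvCommit (d : PySem.Dict String String) (cur : Option String) (buf : List String) :
    PySem.Dict String String :=
  match cur with
  | none => d
  | some cs => if cs = "" then d else d.insert cs (PySem.Str.strip (PySem.Str.join "\n" buf))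

-- the body of A's for-loop, over state (sections, current_section, current_lines)
def pvStepA (st : PySem.Dict String String × Option String × List String) (line : String) :
    PySem.Dict String String × Option String × List String :=
  if PySem.Str.startswith line "--- " && PySem.Str.endswith line " ---" then
    (pvCommit st.1 st.2.1 st.2.2,
     some (PySem.Str.lower (PySem.Str.stripChars line "- ")), ([] : List String))
  else
    (st.1, st.2.1, st.2.2 ++ [line])

def parse_sections_from_txt (content : String) : List (String × String) :=
  let fin := (PySem.Str.splitlines content).foldl pvStepA (PySem.Dict.empty, none, [])
  (pvCommit fin.1 fin.2.1 fin.2.2).items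

-- ===== PORT B =====
def pvIsHeader (line : String) : Bool :=
  PySem.Str.startswith line "--- " && PySem.Str.endswith line " ---"

-- Source B's next_body: split at the first header line
def pvNextBody (ls : List String) : List String × List String :=
  (ls.takeWhile (fun l => !pvIsHeader l), ls.dropWhile (fun l => !pvIsHeader l))

-- Source B's while-loop over the remainder (rest is empty or starts at a header)
def pvGoB (rest : List String) (sections : PySem.Dict String String) : PySem.Dict String String :=
  match rest with
  | [] => sections
  | h :: t =>
    let name := PySem.Str.lower (PySem.Str.stripChars h "- ")
    let p := pvNextBody t
    pvGoB p.2
      (if name = "" then sections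
       else sections.insert name (PySem.Str.strip (PySem.Str.join "\n" p.1)))
termination_by rest.length
decreasing_by
  simp only [pvNextBody]
  have := List.length_dropWhile_le (fun l => !pvIsHeader l) t
  simp only [List.length_cons]; omega

def parse_sections_from_txt_alt (content : String) : List (String × String) :=
  (pvGoB (pvNextBody (PySem.Str.splitlines content)).2 PySem.Dict.empty).items

-- ===== PRECONDITION & SPEC =====
def Spec_parse_sections_from_txt (content : String) (out : List (String × String)) : Prop := out = parse_sections_from_txt_alt content
instance (content : String) (out : List (String × String)) : Decidable (Spec_parse_sections_from_txt content out) := by unfold Spec_parse_sections_from_txt; infer_instance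

-- ===== CLAIM (what is proved, stated in full; the proofs are below) =====
def Claim_equal_parse_sections_from_txt : Prop := ∀ (content : String), Dom_parse_sections_from_txt content → Spec_parse_sections_from_txt content (parse_sections_from_txt content)

-- ===== LEMMAS AND PROOFS =====

-- the head of a non-empty dropWhile falsifies the predicate
theorem pvDropWhile_head {α : Type} (p : α → Bool) (l : List α) (a : α) (t : List α)
    (h : l.dropWhile p = a :: t) : p a = false := by
  induction l with
  | nil => simp at h
  | cons x xs ih =>
    by_cases hx : p x = true
    · rw [List.dropWhile_cons_of_pos hx] at h; exact ih h
    · rw [List.dropWhile_cons_of_neg hx] at h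
      cases h; simpa using hx

-- a non-header prefix of the remaining lines is absorbed into the line buffer
theorem pvFoldA_absorb (ls : List String) :
    ∀ (d : PySem.Dict String String) (cur : Option String) (buf : List String),
    ls.foldl pvStepA (d, cur, buf)
      = (ls.dropWhile (fun l => !pvIsHeader l)).foldl pvStepA
          (d, cur, buf ++ ls.takeWhile (fun l => !pvIsHeader l)) := by
  induction ls with
  | nil => intro d cur buf; simp
  | cons a t ih =>
    intro d cur buf
    by_cases ha : pvIsHeader a = true
    · have h1 : (fun l => !pvIsHeader l) a = false := by simp [ha]
      rw [List.dropWhile_cons_of_neg (by simp [h1]), List.takeWhile_cons_of_neg (by simp [h1])]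
      simp
    · have ha' : pvIsHeader a = false := by simpa using ha
      have hstep : pvStepA (d, cur, buf) a = (d, cur, buf ++ [a]) := by
        simp only [pvStepA]
        rw [if_neg (show ¬(PySem.Str.startswith a "--- " && PySem.Str.endswith a " ---") = true from ha)]
      simp only [List.dropWhile_cons, List.takeWhile_cons, ha', Bool.not_false, if_true,
        List.foldl_cons, hstep, ih]
      simp

-- main invariant: finishing A's fold from any state matches B's segment loop
theorem pvMain (ls : List String) (d : PySem.Dict String String)
    (cur : Option String) (buf : List String) :
    pvCommit (ls.foldl pvStepA (d, cur, buf)).1 (ls.foldl pvStepA (d, cur, buf)).2.1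
        (ls.foldl pvStepA (d, cur, buf)).2.2
      = pvGoB (ls.dropWhile (fun l => !pvIsHeader l))
          (pvCommit d cur (buf ++ ls.takeWhile (fun l => !pvIsHeader l))) := by
  rw [pvFoldA_absorb]
  cases hdw : ls.dropWhile (fun l => !pvIsHeader l) with
  | nil => simp [pvGoB, pvCommit]
  | cons h t =>
    have hh : pvIsHeader h = true := by
      have := pvDropWhile_head (fun l => !pvIsHeader l) ls h t hdw
      simpa using this
    have hstep : pvStepA (d, cur, buf ++ ls.takeWhile (fun l => !pvIsHeader l)) h
        = (pvCommit d cur (buf ++ ls.takeWhile (fun l => !pvIsHeader l)),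
           some (PySem.Str.lower (PySem.Str.stripChars h "- ")), ([] : List String)) := by
      simp only [pvStepA]
      rw [if_pos (show (PySem.Str.startswith h "--- " && PySem.Str.endswith h " ---") = true from hh)]
    have hlen : t.length < ls.length := by
      have := List.length_dropWhile_le (fun l => !pvIsHeader l) ls
      rw [hdw] at this; simp at this; omega
    rw [List.foldl_cons, hstep, pvMain t]
    simp only [pvGoB, pvNextBody, List.nil_append]
    congr 1
termination_by ls.length
decreasing_by exact hlen

-- ===== VERDICT (by name: the statement is the Claim_ definition above) =====
theorem parse_sections_from_txt_spec : Claim_equal_parse_sections_from_txt := by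
  intro content _
  show parse_sections_from_txt content = parse_sections_from_txt_alt content
  show (pvCommit (((PySem.Str.splitlines content).foldl pvStepA (PySem.Dict.empty, none, [])).1)
      (((PySem.Str.splitlines content).foldl pvStepA (PySem.Dict.empty, none, [])).2.1)
      (((PySem.Str.splitlines content).foldl pvStepA (PySem.Dict.empty, none, [])).2.2)).items
    = (pvGoB (pvNextBody (PySem.Str.splitlines content)).2 PySem.Dict.empty).items
  rw [pvMain]
  simp [pvCommit, pvNextBody]
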